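-- pv_equiv track=rewrite | github.com/d781/WYROWNANIE_SWOBODNE | funkcje.py | kie2katy
-- ===== SOURCE A (Python) =====
-- def kie2katy(kier):
--     stan = []
--     st = kier[0][0]
--     tmp = []
--     for i in kier:
--         if i[0] == st:
--             tmp.append(i)
--         else:
--             st = i[0]
--             stan.append(tmp)
--             tmp = []
--             tmp.append(i)
--     stan.append(tmp)
--     tmp = []
--     for st in stan:
--         for i, nr in enumerate(st):
--             if i == 0:
--                 zerowy = nr[2]
--                 lewe = nr[1]
--             else:
--                 nr[2] = nr[2] - zerowy
--                 if nr[2] < 0: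
--                     nr[2] += 400
--                 nr.insert(0,lewe)
--                 tmp.append(nr)
--     return tmp
-- ===== SOURCE B (Python) =====
-- def kie2katy(kier):
--     # Single linear pass: remember the current group's key/lewe/zerowy; emit a
--     # fresh transformed row for every non-group-start entry.
--     # (Unlike A, B does not mutate the input rows in place.)
--     out = []
--     first = True
--     prev = lewe = zerowy = 0
--     for row in kier:
--         if first or row[0] != prev:
--             first = False
--             prev, lewe, zerowy = row[0], row[1], row[2]
--         else:
--             d = row[2] - zerowy
--             if d < 0:
--                 d += 400
--             out.append([lewe] + row[:2] + [d] + row[3:])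
--     return out
-- ===== Notes on version B (the rewrite author's own statement) =====
-- stated objective: simpler
-- what changed: B fuses A's two passes (build a list of station groups, then re-walk groups with enumerate and mutate rows in place) into one linear pass that keeps only the current group's key/lewe/zerowy and emits fresh rows; no intermediate group list and no mutation of the input.
import Mathlib
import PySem

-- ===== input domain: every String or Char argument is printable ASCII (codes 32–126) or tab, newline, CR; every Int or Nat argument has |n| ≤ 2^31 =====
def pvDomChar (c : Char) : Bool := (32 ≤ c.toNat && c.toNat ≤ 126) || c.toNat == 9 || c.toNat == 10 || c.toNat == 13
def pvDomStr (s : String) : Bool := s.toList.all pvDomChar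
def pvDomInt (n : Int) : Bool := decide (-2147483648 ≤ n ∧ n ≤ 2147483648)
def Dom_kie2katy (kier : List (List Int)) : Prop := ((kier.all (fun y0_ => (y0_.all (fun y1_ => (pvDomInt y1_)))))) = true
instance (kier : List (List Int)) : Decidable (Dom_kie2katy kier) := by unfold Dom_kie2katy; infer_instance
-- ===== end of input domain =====

-- B fuses A's two passes into one linear pass keeping only the current group's key/lewe/zerowy
-- (objective: simpler). A mutates the input rows in place and returns them; B builds fresh rows:
-- the equivalence proved here is about the RETURN value only.

-- ===== PORT A =====
-- indexing: inside Pre_ every index used is in range, so List.getD matches Python's xs[i];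
-- nr[2] = v is List.set (in range under Pre_); nr.insert(0,lewe) is cons.
-- loop body of A's first pass, state (stan, st, tmp)
def pvStepA (acc : List (List (List Int)) × Int × List (List Int)) (i : List Int) :
    List (List (List Int)) × Int × List (List Int) :=
  let (stan, st, tmp) := acc
  if i.getD 0 0 = st then (stan, st, tmp ++ [i])
  else (stan ++ [tmp], i.getD 0 0, [i])

-- body of A's inner second-pass loop 'for i, nr in enumerate(st)', state (tmp, zerowy, lewe)
def pvInner (acc2 : List (List Int) × Int × Int) (p : Int × List Int) :
    List (List Int) × Int × Int :=
  let (tmp, zerowy, lewe) := acc2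
  if p.1 = 0 then (tmp, p.2.getD 2 0, p.2.getD 1 0)
  else
    let v := p.2.getD 2 0 - zerowy
    let v := if v < 0 then v + 400 else v
    (tmp ++ [lewe :: p.2.set 2 v], zerowy, lewe)

def kie2katy (kier : List (List Int)) : List (List Int) :=
  let st0 : Int := (kier.getD 0 []).getD 0 0
  let r1 := kier.foldl pvStepA ([], st0, [])
  let stan := r1.1 ++ [r1.2.2]
  (stan.foldl (fun acc st => (PySem.List.enumerate st 0).foldl pvInner acc) ([], 0, 0)).1

-- ===== PORT B =====
-- loop body of B's single pass, state (out, first, prev, lewe, zerowy)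
def pvStepB (acc : List (List Int) × Bool × Int × Int × Int) (row : List Int) :
    List (List Int) × Bool × Int × Int × Int :=
  let (out, first, prev, lewe, zerowy) := acc
  if first || (row.getD 0 0 != prev) then
    (out, false, row.getD 0 0, row.getD 1 0, row.getD 2 0)
  else
    let d := row.getD 2 0 - zerowy
    let d := if d < 0 then d + 400 else d
    (out ++ [lewe :: (PySem.List.slice row none (some 2) ++ [d] ++ PySem.List.slice row (some 3) none)],
     first, prev, lewe, zerowy)

def kie2katy_alt (kier : List (List Int)) : List (List Int) :=
  (kier.foldl pvStepB ([], true, 0, 0, 0)).1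

-- ===== PRECONDITION & SPEC =====
-- Pre_ excludes exactly the inputs on which the Python A raises IndexError:
-- empty kier (kier[0][0]) and any row of length < 3 (nr[1]/nr[2]).
def Pre_kie2katy (kier : List (List Int)) : Prop :=
  kier ≠ [] ∧ ∀ r ∈ kier, 3 ≤ r.length
instance (kier : List (List Int)) : Decidable (Pre_kie2katy kier) := by unfold Pre_kie2katy; infer_instance
def pvWitness_kie2katy : List (List Int) := [[1, 2, 3], [1, 4, 5], [2, 7, 8]]

def Spec_kie2katy (kier : List (List Int)) (out : List (List Int)) : Prop := out = kie2katy_alt kier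
instance (kier : List (List Int)) (out : List (List Int)) : Decidable (Spec_kie2katy kier out) := by unfold Spec_kie2katy; infer_instance

-- ===== CLAIM (what is proved, stated in full; the proofs are below) =====
def Claim_equal_kie2katy : Prop := ∀ (kier : List (List Int)), Dom_kie2katy kier → Pre_kie2katy kier → Spec_kie2katy kier (kie2katy kier)

-- ===== LEMMAS AND PROOFS =====

-- the common recursive form both ports are reduced to
def pvTf (lewe zerowy : Int) (r : List Int) : List Int :=
  lewe :: r.set 2 (if r.getD 2 0 - zerowy < 0 then r.getD 2 0 - zerowy + 400 else r.getD 2 0 - zerowy)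

def pvGo (key lewe zerowy : Int) : List (List Int) → List (List Int)
  | [] => []
  | r :: rs =>
    if r.getD 0 0 = key then pvTf lewe zerowy r :: pvGo key lewe zerowy rs
    else pvGo (r.getD 0 0) (r.getD 1 0) (r.getD 2 0) rs

-- A's first-pass fold computes this grouping
def pvGrp (st : Int) (tmp : List (List Int)) :
    List (List Int) → List (List (List Int)) × Int × List (List Int)
  | [] => ([], st, tmp)
  | i :: rest =>
    if i.getD 0 0 = st then pvGrp st (tmp ++ [i]) rest
    else
      let r := pvGrp (i.getD 0 0) [i] rest
      (tmp :: r.1, r.2)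

def pvProcGroup : List (List Int) → List (List Int)
  | [] => []
  | h :: t => t.map (pvTf (h.getD 1 0) (h.getD 2 0))

theorem pvFoldA_eq_grp (rest : List (List Int)) :
    ∀ (stan : List (List (List Int))) (st : Int) (tmp : List (List Int)),
    rest.foldl pvStepA (stan, st, tmp)
      = (stan ++ (pvGrp st tmp rest).1, (pvGrp st tmp rest).2) := by
  induction rest with
  | nil => intro stan st tmp; simp [pvGrp]
  | cons i rest ih =>
    intro stan st tmp
    by_cases h : i.getD 0 0 = st
    all_goals simp only [List.getD] at h
    · rw [List.foldl_cons,
        show pvStepA (stan, st, tmp) i = (stan, st, tmp ++ [i]) from by simp [pvStepA, h],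
        ih, show pvGrp st tmp (i :: rest) = pvGrp st (tmp ++ [i]) rest from by simp [pvGrp, h]]
    · rw [List.foldl_cons,
        show pvStepA (stan, st, tmp) i = (stan ++ [tmp], i.getD 0 0, [i]) from by simp [pvStepA, h],
        ih, show pvGrp st tmp (i :: rest)
          = (tmp :: (pvGrp (i.getD 0 0) [i] rest).1, (pvGrp (i.getD 0 0) [i] rest).2) from by
            simp [pvGrp, h]]
      simp

theorem pvInner_enum (t : List (List Int)) :
    ∀ (s : Int), 1 ≤ s → ∀ (tmp : List (List Int)) (z l : Int),
    (PySem.List.enumerate t s).foldl pvInner (tmp, z, l)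
      = (tmp ++ t.map (pvTf l z), z, l) := by
  induction t with
  | nil => intro s hs tmp z l; simp [PySem.List.enumerate_nil]
  | cons x t ih =>
    intro s hs tmp z l
    rw [PySem.List.enumerate_cons]
    have hs0 : ¬ ((s : Int) = 0) := by omega
    rw [List.foldl_cons,
      show pvInner (tmp, z, l) (s, x) = (tmp ++ [l :: x.set 2
        (if x.getD 2 0 - z < 0 then x.getD 2 0 - z + 400 else x.getD 2 0 - z)], z, l) from by
          simp [pvInner, hs0],
      ih (s + 1) (by omega)]
    simp [pvTf]

theorem pvInner_group (h : List Int) (t : List (List Int)) (tmp : List (List Int)) (z l : Int) :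
    (PySem.List.enumerate (h :: t) 0).foldl pvInner (tmp, z, l)
      = (tmp ++ t.map (pvTf (h.getD 1 0) (h.getD 2 0)), h.getD 2 0, h.getD 1 0) := by
  rw [PySem.List.enumerate_cons, List.foldl_cons,
    show pvInner (tmp, z, l) (0, h) = (tmp, h.getD 2 0, h.getD 1 0) from by simp [pvInner]]
  exact pvInner_enum t (0 + 1) (by omega) tmp _ _

theorem pvPass2 (gs : List (List (List Int))) :
    ∀ (tmp : List (List Int)) (z l : Int),
    (gs.foldl (fun acc st => (PySem.List.enumerate st 0).foldl pvInner acc) (tmp, z, l)).1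
      = tmp ++ gs.flatMap pvProcGroup := by
  induction gs with
  | nil => intro tmp z l; simp
  | cons g gs ih =>
    intro tmp z l
    cases g with
    | nil =>
      simp only [List.foldl_cons, PySem.List.enumerate_nil, List.foldl_nil]
      rw [ih]; simp [pvProcGroup]
    | cons h t =>
      simp only [List.foldl_cons]
      rw [pvInner_group, ih]
      simp [pvProcGroup]

theorem pvFlat_grp (rest : List (List Int)) :
    ∀ (key : Int) (h : List Int) (t : List (List Int)),
    ((pvGrp key (h :: t) rest).1 ++ [(pvGrp key (h :: t) rest).2.2]).flatMap pvProcGroup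
      = t.map (pvTf (h.getD 1 0) (h.getD 2 0)) ++ pvGo key (h.getD 1 0) (h.getD 2 0) rest := by
  induction rest with
  | nil => intro key h t; simp [pvGrp, pvGo, pvProcGroup]
  | cons i rest ih =>
    intro key h t
    by_cases hc : i.getD 0 0 = key
    all_goals simp only [List.getD] at hc
    · rw [show pvGrp key (h :: t) (i :: rest) = pvGrp key (h :: (t ++ [i])) rest from by
        simp [pvGrp, hc]]
      rw [ih, show pvGo key (h.getD 1 0) (h.getD 2 0) (i :: rest)
        = pvTf (h.getD 1 0) (h.getD 2 0) i :: pvGo key (h.getD 1 0) (h.getD 2 0) rest from by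
          simp [pvGo, hc]]
      simp
    · rw [show pvGrp key (h :: t) (i :: rest)
        = ((h :: t) :: (pvGrp (i.getD 0 0) [i] rest).1, (pvGrp (i.getD 0 0) [i] rest).2) from by
          simp [pvGrp, hc]]
      rw [show pvGo key (h.getD 1 0) (h.getD 2 0) (i :: rest)
        = pvGo (i.getD 0 0) (i.getD 1 0) (i.getD 2 0) rest from by simp [pvGo, hc]]
      simp only [List.cons_append, List.flatMap_cons]
      rw [ih (i.getD 0 0) i []]
      simp [pvProcGroup]

theorem pvA_eq_go (r : List Int) (rs : List (List Int)) :
    kie2katy (r :: rs) = pvGo (r.getD 0 0) (r.getD 1 0) (r.getD 2 0) rs := by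
  simp only [kie2katy]
  rw [show ((r :: rs).getD 0 []).getD 0 0 = r.getD 0 0 from rfl,
    List.foldl_cons,
    show pvStepA ([], r.getD 0 0, []) r = ([], r.getD 0 0, [r]) from by simp [pvStepA],
    pvFoldA_eq_grp, pvPass2]
  have := pvFlat_grp rs (r.getD 0 0) r []
  simp only [List.map_nil, List.nil_append] at this ⊢
  rw [this]

theorem pvB_tail (rs : List (List Int)) :
    ∀ (out : List (List Int)) (k l z : Int), (∀ r ∈ rs, 3 ≤ r.length) →
    (rs.foldl pvStepB (out, false, k, l, z)).1 = out ++ pvGo k l z rs := by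
  induction rs with
  | nil => intro out k l z _; simp [pvGo]
  | cons r rs ih =>
    intro out k l z hlen
    have hr : 3 ≤ r.length := hlen r (by simp)
    have hrs : ∀ r' ∈ rs, 3 ≤ r'.length := fun r' h => hlen r' (by simp [h])
    by_cases hc : r.getD 0 0 = k
    all_goals simp only [List.getD] at hc
    · obtain ⟨a, b, c, rest, rfl⟩ : ∃ a b c rest, r = a :: b :: c :: rest := by
        match r, hr with
        | a :: b :: c :: rest, _ => exact ⟨a, b, c, rest, rfl⟩
      have ha : a = k := by simpa using hc
      subst ha
      rw [List.foldl_cons,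
        show pvStepB (out, false, a, l, z) (a :: b :: c :: rest)
          = (out ++ [l :: (PySem.List.slice (a :: b :: c :: rest) none (some 2)
              ++ [if c - z < 0 then c - z + 400 else c - z]
              ++ PySem.List.slice (a :: b :: c :: rest) (some 3) none)], false, a, l, z) from by
            simp [pvStepB, List.getD],
        ih _ _ _ _ hrs,
        show pvGo a l z ((a :: b :: c :: rest) :: rs)
          = pvTf l z (a :: b :: c :: rest) :: pvGo a l z rs from by simp [pvGo, List.getD]]
      have hrow : l :: (PySem.List.slice (a :: b :: c :: rest) none (some 2)
              ++ [if c - z < 0 then c - z + 400 else c - z]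
              ++ PySem.List.slice (a :: b :: c :: rest) (some 3) none)
          = pvTf l z (a :: b :: c :: rest) := by
        simp [pvTf, PySem.List.slice, PySem.List.clampIdx, List.set, List.getD]
      rw [hrow]; simp
    · rw [List.foldl_cons,
        show pvStepB (out, false, k, l, z) r
          = (out, false, r.getD 0 0, r.getD 1 0, r.getD 2 0) from by
            simp [pvStepB, List.getD, hc],
        ih _ _ _ _ hrs,
        show pvGo k l z (r :: rs) = pvGo (r.getD 0 0) (r.getD 1 0) (r.getD 2 0) rs from by
          simp [pvGo, List.getD, hc]]

theorem pvB_eq_go (r : List Int) (rs : List (List Int)) (hlen : ∀ r' ∈ rs, 3 ≤ r'.length) :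
    kie2katy_alt (r :: rs) = pvGo (r.getD 0 0) (r.getD 1 0) (r.getD 2 0) rs := by
  simp only [kie2katy_alt]
  rw [List.foldl_cons,
    show pvStepB ([], true, 0, 0, 0) r
      = ([], false, r.getD 0 0, r.getD 1 0, r.getD 2 0) from by simp [pvStepB],
    pvB_tail rs [] _ _ _ hlen]
  simp

-- ===== VERDICT (by name: the statement is the Claim_ definition above) =====
theorem kie2katy_spec : Claim_equal_kie2katy := by
  intro kier _ hpre
  obtain ⟨hne, hlen⟩ := hpre
  cases kier with
  | nil => exact absurd rfl hne
  | cons r rs =>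
    show kie2katy (r :: rs) = kie2katy_alt (r :: rs)
    rw [pvA_eq_go, pvB_eq_go r rs (fun r' h => hlen r' (by simp [h]))]
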